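-- pv_equiv track=rewrite | github.com/jasmine0122/NYCU_Cryptography-Engineering | Quiz3/310555004_Ans/310555004_q2.py | group_word
-- ===== SOURCE A (Python) =====
-- def group_word(klen, t):
--     data = ""
--     G = []
--     for j in range(0, int(klen)):
--         c = j
--         while (c < len(t)):
--             data += t[c]
--             c += int(klen)
--         G.append(data)
--         data = ""
--     return G
-- ===== SOURCE B (Python) =====
-- def group_word(klen, t):
--     k = int(klen)
--     if k <= 0:
--         return []
--     buckets = [[] for _ in range(k)]
--     for i, ch in enumerate(t):
--         buckets[i % k].append(ch)
--     return ["".join(b) for b in buckets]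
-- ===== Notes on version B (the rewrite author's own statement) =====
-- stated objective: alternative
-- what changed: B makes a single left-to-right pass over t with enumerate, appending each character to bucket i % k, instead of A's one stride-scan (j, j+k, j+2k, ...) of t per column with a while loop.
import Mathlib
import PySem

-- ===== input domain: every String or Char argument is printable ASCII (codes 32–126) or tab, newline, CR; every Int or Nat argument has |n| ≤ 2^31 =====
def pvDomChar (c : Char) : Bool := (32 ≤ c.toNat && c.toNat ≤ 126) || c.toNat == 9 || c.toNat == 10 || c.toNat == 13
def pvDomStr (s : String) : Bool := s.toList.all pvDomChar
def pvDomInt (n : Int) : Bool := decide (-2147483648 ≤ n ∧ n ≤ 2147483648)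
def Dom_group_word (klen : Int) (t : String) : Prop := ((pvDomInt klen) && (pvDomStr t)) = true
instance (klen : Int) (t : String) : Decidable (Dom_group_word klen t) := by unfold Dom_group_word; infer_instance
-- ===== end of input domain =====

-- B replaces A's per-column stride scans by a single left-to-right pass that distributes
-- each character into bucket i % k (objective: alternative decomposition, same cost).

-- ===== PORT A =====
-- inner 'while c < len(t): data += t[c]; c += int(klen)'.  The loop is only entered from the
-- 'for j in range(0, int(klen))' body, where int(klen) ≥ 1; the step is passed as s with
-- s + 1 = int(klen) so that termination is structural (c strictly increases each iteration).
-- data is kept as the List Char of the characters appended (strings are built on the list side).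
def whileA (tl : List Char) (s : Nat) (c : Nat) : List Char :=
  if h : c < tl.length then tl[c] :: whileA tl s (c + s + 1) else []
termination_by tl.length - c

-- 'G = []; for j in range(0, int(klen)): …; G.append(data)': fold over the range appending
-- one string per column j (data starts at "" each iteration, so it is just the inner loop's chars).
def group_word (klen : Int) (t : String) : List String :=
  (PySem.List.pyRange 0 klen 1).foldl
    (fun G j => G ++ [String.ofList (whileA t.toList (klen.toNat - 1) j.toNat)]) []

-- ===== PORT B =====
-- loop body 'buckets[i % k].append(ch)'; i comes from enumerate so i ≥ 0 and i % k is Nat mod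
def bucketStep (k : Nat) (bs : List (List Char)) (p : Int × Char) : List (List Char) :=
  bs.modify (p.1.toNat % k) (· ++ [p.2])

def group_word_alt (klen : Int) (t : String) : List String :=
  if klen ≤ 0 then []
  else
    let k := klen.toNat
    let buckets : List (List Char) := List.replicate k []
    ((PySem.List.enumerate t.toList 0).foldl (bucketStep k) buckets).map String.ofList

-- ===== PRECONDITION & SPEC =====
def Spec_group_word (klen : Int) (t : String) (out : List String) : Prop := out = group_word_alt klen t
instance (klen : Int) (t : String) (out : List String) : Decidable (Spec_group_word klen t out) := by unfold Spec_group_word; infer_instance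

-- ===== CLAIM (what is proved, stated in full; the proofs are below) =====
def Claim_equal_group_word : Prop := ∀ (klen : Int) (t : String), Dom_group_word klen t → Spec_group_word klen t (group_word klen t)

-- ===== LEMMAS AND PROOFS =====

-- the characters of l at positions ≡ j (mod k), positions counted from n
def sieveF (k j : Nat) : Nat → List Char → List Char
  | _, [] => []
  | n, c :: l => if n % k = j then c :: sieveF k j (n+1) l else sieveF k j (n+1) l

-- head, then every (s+1)-th element
def eK (s : Nat) : List Char → List Char
  | [] => []
  | c :: l => c :: eK s (l.drop s)
termination_by l => l.length
decreasing_by simpa using Nat.lt_succ_of_le (List.length_drop_le s l)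

theorem eK_nil (s : Nat) : eK s [] = [] := by conv_lhs => unfold eK

theorem eK_cons (s : Nat) (c : Char) (l : List Char) :
    eK s (c :: l) = c :: eK s (l.drop s) := by conv_lhs => unfold eK

theorem whileA_eq_eK (tl : List Char) (s c : Nat) : whileA tl s c = eK s (tl.drop c) := by
  rw [whileA]
  split
  · rename_i h
    rw [List.drop_eq_getElem_cons h, eK_cons, whileA_eq_eK tl s (c + s + 1), List.drop_drop,
      show c + 1 + s = c + s + 1 from by omega]
  · rename_i h
    rw [List.drop_eq_nil_of_le (by omega), eK_nil]
termination_by tl.length - c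

theorem sieveF_eq_eK (k j : Nat) (hk : 0 < k) (hj : j < k) :
    ∀ (l : List Char) (n r : Nat), r < k → (n + r) % k = j →
      sieveF k j n l = eK (k-1) (l.drop r) := by
  intro l
  induction l with
  | nil => intro n r _ _; simp [sieveF, eK_nil]
  | cons c l ih =>
    intro n r hr hnr
    match r with
    | 0 =>
      have hn : n % k = j := by simpa using hnr
      rw [List.drop_zero, eK_cons, sieveF, if_pos hn,
        ih (n+1) (k-1) (by omega) (by rw [show n + 1 + (k-1) = n + k by omega, Nat.add_mod_right]; exact hn)]
    | r' + 1 =>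
      have hne : n % k ≠ j := by
        intro hn
        rw [Nat.add_mod, hn, Nat.mod_eq_of_lt hr] at hnr
        rcases Nat.lt_or_ge (j + (r' + 1)) k with h | h
        · rw [Nat.mod_eq_of_lt h] at hnr; omega
        · rw [Nat.mod_eq_sub_mod h, Nat.mod_eq_of_lt (by omega)] at hnr; omega
      rw [sieveF, if_neg hne, List.drop_succ_cons,
        ih (n+1) r' (by omega) (by rw [show n + 1 + r' = n + (r' + 1) by omega]; exact hnr)]

theorem length_foldl_bucketStep (k : Nat) (l : List Char) :
    ∀ (n : Int) (bs : List (List Char)),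
      ((PySem.List.enumerate l n).foldl (bucketStep k) bs).length = bs.length := by
  induction l with
  | nil => intro n bs; simp [PySem.List.enumerate_nil]
  | cons c l ih =>
    intro n bs
    rw [PySem.List.enumerate_cons, List.foldl_cons, ih]
    simp [bucketStep]

theorem getElem?_foldl_bucketStep (k : Nat) (l : List Char) :
    ∀ (n : Nat) (bs : List (List Char)) (j : Nat), bs.length = k → j < k →
      ((PySem.List.enumerate l (n : Int)).foldl (bucketStep k) bs)[j]?
        = bs[j]?.map (· ++ sieveF k j n l) := by
  induction l with
  | nil =>
    intro n bs j hbs hj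
    rw [PySem.List.enumerate_nil, List.foldl_nil, sieveF]
    rw [List.getElem?_eq_getElem (by omega)]
    simp
  | cons c l ih =>
    intro n bs j hbs hj
    have hcast : (n : Int) + 1 = ((n + 1 : Nat) : Int) := by push_cast; ring
    have hstep : bucketStep k bs ((n : Int), c) = bs.modify (n % k) (· ++ [c]) := by
      simp [bucketStep]
    rw [PySem.List.enumerate_cons, List.foldl_cons, hcast, hstep,
      ih (n+1) (bs.modify (n % k) (· ++ [c])) j (by simpa using hbs) hj,
      List.getElem?_modify, sieveF]
    cases hbj : bs[j]? with
    | none => simp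
    | some d =>
      by_cases hc : n % k = j
      · simp [hc, List.append_assoc]
      · simp [hc]

theorem group_word_eq_alt (klen : Int) (t : String) :
    group_word klen t = group_word_alt klen t := by
  by_cases hle : klen ≤ 0
  · rw [group_word, group_word_alt, if_pos hle, PySem.List.pyRange_one_eq_nil hle, List.foldl_nil]
  · have hk : 0 < klen.toNat := by omega
    rw [group_word, group_word_alt, if_neg hle,
      PySem.List.foldl_append_singleton_eq_map, PySem.List.pyRange_one]
    apply List.ext_getElem?
    intro j
    by_cases hj : j < klen.toNat
    · rw [List.nil_append, List.getElem?_map, List.getElem?_map, List.getElem?_map,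
        List.getElem?_eq_getElem (l := List.range _) (by simpa using (by omega : j < (klen - 0).toNat)),
        List.getElem_range]
      have hfold := getElem?_foldl_bucketStep klen.toNat t.toList 0 (List.replicate klen.toNat []) j
        List.length_replicate hj
      simp only [Nat.cast_zero] at hfold
      rw [hfold, List.getElem?_eq_getElem (by simpa using hj), List.getElem_replicate]
      simp only [Option.map_some]
      congr 1
      have htoNat : ((0 : Int) + (j : Int)).toNat = j := by omega
      rw [htoNat, List.nil_append, whileA_eq_eK,
        sieveF_eq_eK klen.toNat j hk hj t.toList 0 j hj (by simpa using Nat.mod_eq_of_lt hj)]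
    · rw [List.nil_append, List.getElem?_eq_none (by simp; omega),
        List.getElem?_eq_none (by rw [List.length_map, length_foldl_bucketStep, List.length_replicate]; omega)]

-- ===== VERDICT (by name: the statement is the Claim_ definition above) =====
theorem group_word_spec : Claim_equal_group_word := by
  intro klen t _
  unfold Spec_group_word
  exact group_word_eq_alt klen t
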